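-- pv_equiv track=rewrite | github.com/ddanh2436/Futoshiki-Logic-Project | Source/futoshiki_ui.py | reconstruct_grid_from_dpll
-- ===== SOURCE A (Python) =====
-- def get_var_id(i, j, v, N):
--     return (i-1)*N**2 + (j-1)*N + v
--
-- def reconstruct_grid_from_dpll(asn, N):
--     grid = [[0]*N for _ in range(N)]
--     for i in range(1,N+1):
--         for j in range(1,N+1):
--             for v in range(1,N+1):
--                 var = get_var_id(i,j,v,N)
--                 if asn.get(var, False):
--                     grid[i-1][j-1] = v
--     return grid
-- ===== SOURCE B (Python) =====
-- def reconstruct_grid_from_dpll(asn, N):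
--     best = {}
--     for var, val in asn.items():
--         if val and 1 <= var <= N * N * N:
--             t = var - 1
--             i = t // (N * N) + 1
--             j = (t // N) % N + 1
--             v = t % N + 1
--             if v > best.get((i, j), 0):
--                 best[(i, j)] = v
--     return [[best.get((i, j), 0) for j in range(1, N + 1)] for i in range(1, N + 1)]
-- ===== Notes on version B (the rewrite author's own statement) =====
-- stated objective: faster
-- what changed: Instead of scanning all N^3 variable ids and looking each up in the assignment, B iterates once over the assignment's entries, decodes each true in-range variable id into (row, col, value) by division/modulo, keeps the maximum value per cell in a dict, and then builds the grid by lookup.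
import Mathlib
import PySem

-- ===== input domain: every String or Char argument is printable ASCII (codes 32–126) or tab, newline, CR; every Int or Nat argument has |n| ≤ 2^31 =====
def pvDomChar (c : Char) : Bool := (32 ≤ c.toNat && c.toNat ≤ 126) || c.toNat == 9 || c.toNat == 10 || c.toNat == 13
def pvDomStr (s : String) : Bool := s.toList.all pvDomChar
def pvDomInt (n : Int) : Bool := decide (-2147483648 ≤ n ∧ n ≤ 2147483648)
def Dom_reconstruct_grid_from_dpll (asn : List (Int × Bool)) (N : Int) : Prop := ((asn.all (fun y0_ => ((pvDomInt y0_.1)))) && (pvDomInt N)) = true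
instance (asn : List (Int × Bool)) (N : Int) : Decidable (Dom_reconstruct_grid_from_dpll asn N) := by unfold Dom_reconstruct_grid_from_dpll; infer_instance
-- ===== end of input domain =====

-- B replaces A's O(N^3) scan over all variable ids by one pass over the assignment's
-- entries (decode id -> (row, col, value), keep the max value per cell) plus an O(N^2) grid build.

-- ===== PORT A =====
def get_var_id (i j v N : Int) : Int := (i - 1) * N ^ 2 + (j - 1) * N + v

def reconstruct_grid_from_dpll (asn : List (Int × Bool)) (N : Int) : List (List Int) :=
  let grid : List (List Int) := List.replicate N.toNat (List.replicate N.toNat 0)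
  (PySem.List.pyRange 1 (N + 1) 1).foldl (fun grid i =>
    (PySem.List.pyRange 1 (N + 1) 1).foldl (fun grid j =>
      (PySem.List.pyRange 1 (N + 1) 1).foldl (fun grid v =>
        if (PySem.Dict.mk asn).getD (get_var_id i j v N) false then
          PySem.List.pySetD grid (i - 1)
            (PySem.List.pySetD (PySem.List.pyGetD grid (i - 1) []) (j - 1) v)
        else grid) grid) grid) grid

-- ===== PORT B =====
def reconstruct_grid_from_dpll_alt (asn : List (Int × Bool)) (N : Int) : List (List Int) :=
  let best : PySem.Dict (Int × Int) Int := asn.foldl (fun best e =>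
    if e.2 && decide (1 ≤ e.1) && decide (e.1 ≤ N * N * N) then
      let t := e.1 - 1
      let i := PySem.Int.floordiv t (N * N) + 1
      let j := PySem.Int.mod (PySem.Int.floordiv t N) N + 1
      let v := PySem.Int.mod t N + 1
      if best.getD (i, j) 0 < v then best.insert (i, j) v else best
    else best) PySem.Dict.empty
  (PySem.List.pyRange 1 (N + 1) 1).map (fun i =>
    (PySem.List.pyRange 1 (N + 1) 1).map (fun j => best.getD (i, j) 0))

-- ===== PRECONDITION & SPEC =====
-- Pre_ excludes association lists with duplicate keys: such lists cannot arise from a Python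
-- dict (A's parameter asn is a dict), and on them first-match lookup vs iteration order is accidental.
def Pre_reconstruct_grid_from_dpll (asn : List (Int × Bool)) (N : Int) : Prop :=
  (asn.map Prod.fst).Nodup
instance (asn : List (Int × Bool)) (N : Int) : Decidable (Pre_reconstruct_grid_from_dpll asn N) := by
  unfold Pre_reconstruct_grid_from_dpll; infer_instance

def pvWitness_reconstruct_grid_from_dpll : (List (Int × Bool)) × Int := ([(1, true), (4, true)], 2)

def Spec_reconstruct_grid_from_dpll (asn : List (Int × Bool)) (N : Int) (out : List (List Int)) : Prop := out = reconstruct_grid_from_dpll_alt asn N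
instance (asn : List (Int × Bool)) (N : Int) (out : List (List Int)) : Decidable (Spec_reconstruct_grid_from_dpll asn N out) := by unfold Spec_reconstruct_grid_from_dpll; infer_instance

-- ===== CLAIM (what is proved, stated in full; the proofs are below) =====
def Claim_equal_reconstruct_grid_from_dpll : Prop := ∀ (asn : List (Int × Bool)) (N : Int), Dom_reconstruct_grid_from_dpll asn N → Pre_reconstruct_grid_from_dpll asn N → Spec_reconstruct_grid_from_dpll asn N (reconstruct_grid_from_dpll asn N)

-- ===== LEMMAS AND PROOFS =====

-- Proof-side abbreviations for the two programs' pieces.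
def pvLookup (asn : List (Int × Bool)) (k : Int) : Bool := (PySem.Dict.mk asn).getD k false
def pvCond (N : Int) (e : Int × Bool) : Bool := e.2 && decide (1 ≤ e.1) && decide (e.1 ≤ N * N * N)
def pvKeyI (N var : Int) : Int := PySem.Int.floordiv (var - 1) (N * N) + 1
def pvKeyJ (N var : Int) : Int := PySem.Int.mod (PySem.Int.floordiv (var - 1) N) N + 1
def pvVal (N var : Int) : Int := PySem.Int.mod (var - 1) N + 1
def pvStep (N : Int) (best : PySem.Dict (Int × Int) Int) (e : Int × Bool) : PySem.Dict (Int × Int) Int :=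
  if pvCond N e then
    (if best.getD (pvKeyI N e.1, pvKeyJ N e.1) 0 < pvVal N e.1 then
      best.insert (pvKeyI N e.1, pvKeyJ N e.1) (pvVal N e.1)
    else best)
  else best

def pvCellFrom (asn : List (Int × Bool)) (N i j c0 : Int) : Int :=
  (PySem.List.pyRange 1 (N + 1) 1).foldl (fun c v => if pvLookup asn (get_var_id i j v N) then v else c) c0

def pvRow (asn : List (Int × Bool)) (N i : Int) (r : List Int) : List Int :=
  (PySem.List.pyRange 1 (N + 1) 1).foldl
    (fun r j => r.set (j - 1).toNat (pvCellFrom asn N i j (r.getD (j - 1).toNat 0))) r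

def set2 (g : List (List Int)) (a b : Nat) (x : Int) : List (List Int) :=
  g.set a ((g.getD a []).set b x)
def get2 (g : List (List Int)) (a b : Nat) : Int := (g.getD a []).getD b 0

lemma pv_getD_nonneg {α : Type} (xs : List α) (i : Int) (d : α) (h : 0 ≤ i) :
    PySem.List.pyGetD xs i d = xs.getD i.toNat d := by
  rw [← Int.toNat_of_nonneg h, PySem.List.pyGetD_natCast]
  simp
  congr 2
  omega

lemma pv_altB (asn : List (Int × Bool)) (N : Int) :
    reconstruct_grid_from_dpll_alt asn N =
      (PySem.List.pyRange 1 (N + 1) 1).map (fun i =>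
        (PySem.List.pyRange 1 (N + 1) 1).map (fun j =>
          (asn.foldl (pvStep N) PySem.Dict.empty).getD (i, j) 0)) := rfl

lemma length_set2 (g : List (List Int)) (a b : Nat) (x : Int) : (set2 g a b x).length = g.length := by
  simp [set2]

lemma getD_set2_self (g : List (List Int)) (a b : Nat) (x : Int) (ha : a < g.length) :
    (set2 g a b x).getD a [] = (g.getD a []).set b x := by
  simp [set2, List.getD, ha]

lemma get2_set2_self (g : List (List Int)) (a b : Nat) (x : Int) (ha : a < g.length)
    (hb : b < (g.getD a []).length) : get2 (set2 g a b x) a b = x := by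
  rw [get2, getD_set2_self g a b x ha]
  have hb' : b < (g[a]?.getD []).length := by simpa [List.getD] using hb
  simp [List.getD, hb']

lemma set2_set2 (g : List (List Int)) (a b : Nat) (x y : Int) (ha : a < g.length) :
    set2 (set2 g a b x) a b y = set2 g a b y := by
  calc set2 (set2 g a b x) a b y
      = (set2 g a b x).set a (((g.getD a []).set b x).set b y) := by
        rw [set2, getD_set2_self g a b x ha]
    _ = (g.set a ((g.getD a []).set b x)).set a ((g.getD a []).set b y) := by
        rw [List.set_set, set2]
    _ = set2 g a b y := by rw [List.set_set, set2]

lemma set2_get2 (g : List (List Int)) (a b : Nat) (ha : a < g.length)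
    (hb : b < (g.getD a []).length) : set2 g a b (get2 g a b) = g := by
  have hrow : g.getD a [] = g[a]'ha := by
    simp [List.getD, List.getElem?_eq_getElem ha]
  have hb2 : b < (g[a]'ha).length := by rw [← hrow]; exact hb
  rw [set2, get2, hrow]
  have h1 : (g[a]'ha).getD b 0 = (g[a]'ha)[b]'hb2 := by
    simp [List.getD, List.getElem?_eq_getElem hb2]
  rw [h1, List.set_getElem_self, List.set_getElem_self]

lemma pv_inner (p : Int → Bool) (l : List Int) :
    ∀ (g : List (List Int)) (a b : Nat), a < g.length → b < (g.getD a []).length →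
    l.foldl (fun g v => if p v then set2 g a b v else g) g
      = set2 g a b (l.foldl (fun c v => if p v then v else c) (get2 g a b)) := by
  induction l with
  | nil => intro g a b ha hb; exact (set2_get2 g a b ha hb).symm
  | cons x l ih =>
    intro g a b ha hb
    simp only [List.foldl_cons]
    by_cases hp : p x = true
    · rw [if_pos hp, if_pos hp]
      rw [ih (set2 g a b x) a b (by rw [length_set2]; exact ha)
        (by rw [getD_set2_self g a b x ha]; simpa using hb)]
      rw [get2_set2_self g a b x ha hb, set2_set2 g a b x _ ha]
    · rw [if_neg hp, if_neg hp]
      exact ih g a b ha hb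

lemma pv_len_fold_set {α : Type} (l : List Int) (pos : Int → Nat) (F : Int → List α → α) :
    ∀ xs : List α, (l.foldl (fun xs j => xs.set (pos j) (F j xs)) xs).length = xs.length := by
  induction l with
  | nil => intro xs; rfl
  | cons x l ih => intro xs; rw [List.foldl_cons, ih]; simp

lemma pv_read_init {α : Type} (F : Int → α → α) (d : α) (l : List Int) :
    ∀ (xs xs0 : List α), l.Pairwise (· ≠ ·) → (∀ j ∈ l, 1 ≤ j) →
      (∀ j ∈ l, xs.getD (j - 1).toNat d = xs0.getD (j - 1).toNat d) →
      l.foldl (fun xs j => xs.set (j - 1).toNat (F j (xs.getD (j - 1).toNat d))) xs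
        = l.foldl (fun xs j => xs.set (j - 1).toNat (F j (xs0.getD (j - 1).toNat d))) xs := by
  induction l with
  | nil => intro xs xs0 _ _ _; rfl
  | cons x l ih =>
    intro xs xs0 hpw hpos h
    rw [List.pairwise_cons] at hpw
    simp only [List.foldl_cons]
    rw [h x (List.mem_cons_self)]
    apply ih _ xs0 hpw.2 (fun j hj => hpos j (List.mem_cons_of_mem _ hj))
    intro j hj
    have h1 : (1:Int) ≤ x := hpos x (List.mem_cons_self)
    have h2 : (1:Int) ≤ j := hpos j (List.mem_cons_of_mem _ hj)
    have hxj : x ≠ j := hpw.1 j hj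
    have hne : x.toNat - 1 ≠ j.toNat - 1 := by omega
    have : (xs.set (x - 1).toNat (F x (xs0.getD (x - 1).toNat d))).getD (j - 1).toNat d
        = xs.getD (j - 1).toNat d := by
      simp [List.getD, List.getElem?_set_ne hne]
    rw [this]
    exact h j (List.mem_cons_of_mem _ hj)

lemma pv_getD_fold_set {α : Type} (c : Int → α) (d : α) (l : List Int) :
    ∀ (xs : List α) (m : Nat), m < xs.length → (∀ j ∈ l, 1 ≤ j) →
      (l.foldl (fun xs j => xs.set (j - 1).toNat (c j)) xs).getD m d
        = if ((m : Int) + 1) ∈ l then c ((m : Int) + 1) else xs.getD m d := by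
  induction l with
  | nil => intro xs m hm hpos; simp
  | cons x l ih =>
    intro xs m hm hpos
    simp only [List.foldl_cons]
    rw [ih _ m (by simpa using hm) (fun j hj => hpos j (List.mem_cons_of_mem _ hj))]
    by_cases hmem : ((m : Int) + 1) ∈ l
    · rw [if_pos hmem, if_pos (List.mem_cons_of_mem _ hmem)]
    · rw [if_neg hmem]
      by_cases hx : x = (m : Int) + 1
      · subst hx
        have hpos1 : ((m : Int) + 1 - 1).toNat = m := by omega
        rw [hpos1]
        rw [if_pos (List.mem_cons_self)]
        simp [List.getD, hm]
      · have h1 : (1:Int) ≤ x := hpos x (List.mem_cons_self)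
        have hne : x.toNat - 1 ≠ m := by omega
        have hnm : ¬ ((m : Int) + 1 ∈ x :: l) := by
          intro hc
          rcases List.mem_cons.mp hc with h | h
          · exact hx h.symm
          · exact hmem h
        rw [if_neg hnm]
        simp [List.getD, List.getElem?_set_ne hne]

lemma pv_getD_eq {α : Type} (l : List α) (d : α) (m : Nat) (h : m < l.length) :
    l.getD m d = l[m] := by
  simp [List.getD, List.getElem?_eq_getElem h]

lemma pvRow_length (asn : List (Int × Bool)) (N i : Int) (r : List Int) :
    (pvRow asn N i r).length = r.length := by
  rw [pvRow]
  exact pv_len_fold_set (PySem.List.pyRange 1 (N + 1) 1) (fun j => (j - 1).toNat)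
    (fun j r => pvCellFrom asn N i j (r.getD (j - 1).toNat 0)) r

lemma pv_stageJ (asn : List (Int × Bool)) (N i : Int) (n : Nat) (hi : 1 ≤ i) :
    ∀ l : List Int, (∀ j ∈ l, 1 ≤ j ∧ (j - 1).toNat < n) →
    ∀ (g : List (List Int)) (a : Nat), a < g.length → (g.getD a []).length = n → a = (i - 1).toNat →
    l.foldl (fun g j =>
      (PySem.List.pyRange 1 (N + 1) 1).foldl (fun g v =>
        if (PySem.Dict.mk asn).getD (get_var_id i j v N) false then
          PySem.List.pySetD g (i - 1)
            (PySem.List.pySetD (PySem.List.pyGetD g (i - 1) []) (j - 1) v)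
        else g) g) g
      = g.set a (l.foldl
          (fun r j => r.set (j - 1).toNat (pvCellFrom asn N i j (r.getD (j - 1).toNat 0)))
          (g.getD a [])) := by
  intro l
  induction l with
  | nil =>
    intro _ g a ha _ _
    have h2 : g.getD a [] = g[a]'ha := pv_getD_eq g [] a ha
    rw [List.foldl_nil, List.foldl_nil, h2, List.set_getElem_self]
  | cons j l ih =>
    intro hl g a ha hrow hai
    obtain ⟨hj1, hjn⟩ := hl j (List.mem_cons_self)
    simp only [List.foldl_cons]
    have hfun : (fun (g : List (List Int)) (v : Int) =>
          if (PySem.Dict.mk asn).getD (get_var_id i j v N) false then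
            PySem.List.pySetD g (i - 1)
              (PySem.List.pySetD (PySem.List.pyGetD g (i - 1) []) (j - 1) v)
          else g)
        = (fun g v => if pvLookup asn (get_var_id i j v N) then set2 g a (j - 1).toNat v else g) := by
      funext g' v
      rw [pv_getD_nonneg g' (i - 1) [] (by omega),
        PySem.List.pySetD_of_nonneg _ _ (by omega : (0:Int) ≤ j - 1),
        PySem.List.pySetD_of_nonneg _ _ (by omega : (0:Int) ≤ i - 1), ← hai]
      rfl
    have hstep : (PySem.List.pyRange 1 (N + 1) 1).foldl (fun g v =>
          if (PySem.Dict.mk asn).getD (get_var_id i j v N) false then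
            PySem.List.pySetD g (i - 1)
              (PySem.List.pySetD (PySem.List.pyGetD g (i - 1) []) (j - 1) v)
          else g) g
        = set2 g a (j - 1).toNat (pvCellFrom asn N i j (get2 g a (j - 1).toNat)) := by
      rw [hfun, pv_inner (fun v => pvLookup asn (get_var_id i j v N)) _ g a (j - 1).toNat ha
        (by rw [hrow]; exact hjn)]
      rfl
    rw [hstep]
    rw [ih (fun j' hj' => hl j' (List.mem_cons_of_mem _ hj')) _ a
      (by rw [length_set2]; exact ha)
      (by rw [getD_set2_self _ _ _ _ ha]; simpa using hrow) hai]
    rw [getD_set2_self _ _ _ _ ha]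
    rw [set2, List.set_set]
    rfl

lemma pv_stageI (asn : List (Int × Bool)) (N : Int) (n : Nat)
    (hn : ∀ j : Int, j ∈ PySem.List.pyRange 1 (N + 1) 1 → 1 ≤ j ∧ (j - 1).toNat < n) :
    ∀ (l : List Int), (∀ i ∈ l, 1 ≤ i ∧ (i - 1).toNat < n) →
    ∀ g : List (List Int), g.length = n → (∀ r ∈ g, r.length = n) →
    l.foldl (fun g i =>
      (PySem.List.pyRange 1 (N + 1) 1).foldl (fun g j =>
        (PySem.List.pyRange 1 (N + 1) 1).foldl (fun g v =>
          if (PySem.Dict.mk asn).getD (get_var_id i j v N) false then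
            PySem.List.pySetD g (i - 1)
              (PySem.List.pySetD (PySem.List.pyGetD g (i - 1) []) (j - 1) v)
          else g) g) g) g
      = l.foldl (fun g i => g.set (i - 1).toNat (pvRow asn N i (g.getD (i - 1).toNat []))) g := by
  intro l
  induction l with
  | nil => intro _ g _ _; rfl
  | cons i l ih =>
    intro hl g hg hrows
    obtain ⟨hi1, hin⟩ := hl i (List.mem_cons_self)
    simp only [List.foldl_cons]
    have ha : (i - 1).toNat < g.length := by rw [hg]; exact hin
    have hrowlen : (g.getD (i - 1).toNat []).length = n := by
      rw [pv_getD_eq g [] _ ha]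
      exact hrows _ (List.getElem_mem ha)
    rw [pv_stageJ asn N i n hi1 (PySem.List.pyRange 1 (N + 1) 1) hn g (i - 1).toNat ha hrowlen rfl]
    have hpv : List.foldl
        (fun r j => r.set (j - 1).toNat (pvCellFrom asn N i j (r.getD (j - 1).toNat 0)))
        (g.getD (i - 1).toNat []) (PySem.List.pyRange 1 (N + 1) 1)
        = pvRow asn N i (g.getD (i - 1).toNat []) := rfl
    rw [hpv]
    exact ih (fun i' hi' => hl i' (List.mem_cons_of_mem _ hi'))
      (g.set (i - 1).toNat (pvRow asn N i (g.getD (i - 1).toNat [])))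
      (by simpa using hg)
      (by
        intro r hr
        rcases List.mem_or_eq_of_mem_set hr with h | h
        · exact hrows r h
        · rw [h, pvRow_length]; exact hrowlen)

lemma pv_foldl_max_char {E : Type} (l : List E) (q : E → Bool) (g : E → Int) (a : Int) :
    a ≤ l.foldl (fun c e => if q e then max c (g e) else c) a ∧
      (l.foldl (fun c e => if q e then max c (g e) else c) a = a ∨
        ∃ e ∈ l, q e = true ∧ l.foldl (fun c e => if q e then max c (g e) else c) a = g e) ∧
      ∀ e ∈ l, q e = true → g e ≤ l.foldl (fun c e => if q e then max c (g e) else c) a := by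
  induction l generalizing a with
  | nil => simp
  | cons x l ih =>
    simp only [List.foldl_cons]
    by_cases hq : q x = true
    · rw [if_pos hq]
      obtain ⟨h1, h2, h3⟩ := ih (max a (g x))
      refine ⟨le_trans (le_max_left _ _) h1, ?_, ?_⟩
      · rcases h2 with h2 | ⟨e, he, hqe, heq⟩
        · rcases max_choice a (g x) with hm | hm
          · left; rw [h2, hm]
          · right; exact ⟨x, List.mem_cons_self, hq, by rw [h2, hm]⟩
        · right; exact ⟨e, List.mem_cons_of_mem _ he, hqe, heq⟩
      · intro e he hqe
        rcases List.mem_cons.mp he with rfl | he'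
        · exact le_trans (le_max_right a (g e)) h1
        · exact h3 e he' hqe
    · rw [if_neg hq]
      obtain ⟨h1, h2, h3⟩ := ih a
      refine ⟨h1, ?_, ?_⟩
      · rcases h2 with h2 | ⟨e, he, hqe, heq⟩
        · exact Or.inl h2
        · exact Or.inr ⟨e, List.mem_cons_of_mem _ he, hqe, heq⟩
      · intro e he hqe
        rcases List.mem_cons.mp he with rfl | he'
        · exact absurd hqe hq
        · exact h3 e he' hqe

lemma pv_foldl_last_eq_max (l : List Int) (p : Int → Bool) :
    l.Pairwise (· ≤ ·) → ∀ a : Int, (∀ v ∈ l, a ≤ v) →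
    l.foldl (fun c v => if p v then v else c) a
      = l.foldl (fun c v => if p v then max c v else c) a := by
  induction l with
  | nil => intro _ a _; rfl
  | cons x l ih =>
    intro hs a ha
    rw [List.pairwise_cons] at hs
    have hax : a ≤ x := ha x (List.mem_cons_self)
    simp only [List.foldl_cons]
    by_cases hp : p x = true
    · rw [if_pos hp, if_pos hp, max_eq_right hax]
      exact ih hs.2 x (fun v hv => hs.1 v hv)
    · rw [if_neg hp, if_neg hp]
      exact ih hs.2 a (fun v hv => le_trans hax (hs.1 v hv))

lemma pv_getD_best_fold (N : Int) (key : Int × Int) (l : List (Int × Bool)) :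
    ∀ best : PySem.Dict (Int × Int) Int,
      (l.foldl (pvStep N) best).getD key 0
        = l.foldl (fun m e =>
            if pvCond N e && ((pvKeyI N e.1, pvKeyJ N e.1) == key) then max m (pvVal N e.1) else m)
          (best.getD key 0) := by
  induction l with
  | nil => intro best; rfl
  | cons e l ih =>
    intro best
    simp only [List.foldl_cons]
    rw [ih (pvStep N best e)]
    congr 1
    rw [pvStep]
    by_cases hc : pvCond N e = true
    · rw [if_pos hc]
      by_cases hk : ((pvKeyI N e.1, pvKeyJ N e.1) == key) = true
      · have hkey : (pvKeyI N e.1, pvKeyJ N e.1) = key := eq_of_beq hk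
        have hcc : (pvCond N e && ((pvKeyI N e.1, pvKeyJ N e.1) == key)) = true := by
          rw [hc, hk]; rfl
        rw [if_pos hcc]
        by_cases hlt : best.getD (pvKeyI N e.1, pvKeyJ N e.1) 0 < pvVal N e.1
        · rw [if_pos hlt, hkey, PySem.Dict.getD_insert_self]
          rw [hkey] at hlt
          exact (max_eq_right (le_of_lt hlt)).symm
        · rw [if_neg hlt]
          rw [hkey] at hlt
          exact (max_eq_left (not_lt.mp hlt)).symm
      · have hne : key ≠ (pvKeyI N e.1, pvKeyJ N e.1) := by
          intro hh
          exact hk (by rw [hh]; exact beq_self_eq_true _)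
        have hcc : ¬ ((pvCond N e && ((pvKeyI N e.1, pvKeyJ N e.1) == key)) = true) := by
          simp only [Bool.and_eq_true]
          intro hh
          exact hk hh.2
        rw [if_neg hcc]
        by_cases hlt : best.getD (pvKeyI N e.1, pvKeyJ N e.1) 0 < pvVal N e.1
        · rw [if_pos hlt]
          exact PySem.Dict.getD_insert_of_ne best (pvVal N e.1) 0 hne
        · rw [if_neg hlt]
    · rw [if_neg hc]
      have hcc : ¬ ((pvCond N e && ((pvKeyI N e.1, pvKeyJ N e.1) == key)) = true) := by
        simp only [Bool.and_eq_true]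
        intro hh
        exact hc hh.1
      rw [if_neg hcc]

lemma pv_encode (N i j v : Int) (hi1 : 1 ≤ i) (hi2 : i ≤ N) (hj1 : 1 ≤ j) (hj2 : j ≤ N)
    (hv1 : 1 ≤ v) (hv2 : v ≤ N) :
    1 ≤ get_var_id i j v N ∧ get_var_id i j v N ≤ N * N * N ∧
      pvKeyI N (get_var_id i j v N) = i ∧ pvKeyJ N (get_var_id i j v N) = j ∧
      pvVal N (get_var_id i j v N) = v := by
  have hN : (1:Int) ≤ N := le_trans hi1 hi2
  have hNpos : (0:Int) < N := by omega
  refine ⟨?_, ?_, ?_, ?_, ?_⟩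
  · have h1 : 0 ≤ (i - 1) * N ^ 2 := mul_nonneg (by omega) (by positivity)
    have h2 : 0 ≤ (j - 1) * N := mul_nonneg (by omega) (by omega)
    rw [get_var_id]
    linarith
  · rw [get_var_id]
    have hA : (i - 1) * N ^ 2 ≤ (N - 1) * N ^ 2 :=
      mul_le_mul_of_nonneg_right (by omega) (by positivity)
    have hB : (j - 1) * N ≤ (N - 1) * N := mul_le_mul_of_nonneg_right (by omega) (by omega)
    nlinarith
  · rw [pvKeyI]
    have ht : get_var_id i j v N - 1 = (i - 1) * (N * N) + ((j - 1) * N + (v - 1)) := by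
      rw [get_var_id]; ring
    rw [ht]
    have hub : (j - 1) * N + (v - 1) < N * N := by nlinarith
    have hlb : 0 ≤ (j - 1) * N + (v - 1) := by
      have := mul_nonneg (by omega : (0:Int) ≤ j - 1) (by omega : (0:Int) ≤ N)
      omega
    have hfd : PySem.Int.floordiv ((i - 1) * (N * N) + ((j - 1) * N + (v - 1))) (N * N) = i - 1 := by
      rw [PySem.Int.floordiv_eq_iff_of_pos (by positivity)]
      constructor
      · linarith
      · nlinarith
    rw [hfd]
    ring
  · rw [pvKeyJ]
    have ht : get_var_id i j v N - 1 = (v - 1) + ((i - 1) * N + (j - 1)) * N := by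
      rw [get_var_id]; ring
    rw [ht]
    have hlb : 0 ≤ (i - 1) * N + (j - 1) := by
      have := mul_nonneg (by omega : (0:Int) ≤ i - 1) (by omega : (0:Int) ≤ N)
      omega
    have hfd : PySem.Int.floordiv ((v - 1) + ((i - 1) * N + (j - 1)) * N) N
        = (i - 1) * N + (j - 1) := by
      rw [PySem.Int.floordiv_eq_iff_of_pos hNpos]
      constructor
      · nlinarith
      · nlinarith
    rw [hfd, PySem.Int.mod_eq_emod_of_pos hNpos]
    have hc : (i - 1) * N + (j - 1) = (j - 1) + N * (i - 1) := by ring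
    rw [hc, Int.add_mul_emod_self_left, Int.emod_eq_of_lt (by omega) (by omega)]
    ring
  · rw [pvVal]
    have ht : get_var_id i j v N - 1 = (v - 1) + N * ((i - 1) * N + (j - 1)) := by
      rw [get_var_id]; ring
    rw [ht, PySem.Int.mod_eq_emod_of_pos hNpos, Int.add_mul_emod_self_left,
      Int.emod_eq_of_lt (by omega) (by omega)]
    ring

lemma pv_decode (N var : Int) (h1 : 1 ≤ var) (h2 : var ≤ N * N * N) (hN : 1 ≤ N) :
    1 ≤ pvKeyI N var ∧ pvKeyI N var ≤ N ∧ 1 ≤ pvKeyJ N var ∧ pvKeyJ N var ≤ N ∧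
      1 ≤ pvVal N var ∧ pvVal N var ≤ N ∧
      get_var_id (pvKeyI N var) (pvKeyJ N var) (pvVal N var) N = var := by
  have hNpos : (0:Int) < N := by omega
  have hNN : (0:Int) < N * N := by positivity
  have ht0 : 0 ≤ var - 1 := by omega
  have htN : var - 1 < N * (N * N) := by nlinarith
  have hv0 : 0 ≤ PySem.Int.mod (var - 1) N := PySem.Int.mod_nonneg _ hNpos
  have hvN : PySem.Int.mod (var - 1) N < N := PySem.Int.mod_lt _ hNpos
  have hu0 : 0 ≤ PySem.Int.mod (PySem.Int.floordiv (var - 1) N) N :=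
    PySem.Int.mod_nonneg _ hNpos
  have huN : PySem.Int.mod (PySem.Int.floordiv (var - 1) N) N < N :=
    PySem.Int.mod_lt _ hNpos
  have hw0 : 0 ≤ PySem.Int.floordiv (var - 1) (N * N) :=
    (PySem.Int.le_floordiv_iff_mul_le hNN).mpr (by simpa using ht0)
  have hwN : PySem.Int.floordiv (var - 1) (N * N) < N :=
    (PySem.Int.floordiv_lt_iff_lt_mul hNN).mpr htN
  have hdiv1 : PySem.Int.floordiv (var - 1) N * N + PySem.Int.mod (var - 1) N = var - 1 :=
    PySem.Int.floordiv_mul_add_mod _ _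
  have hdiv2 : PySem.Int.floordiv (PySem.Int.floordiv (var - 1) N) N * N
      + PySem.Int.mod (PySem.Int.floordiv (var - 1) N) N = PySem.Int.floordiv (var - 1) N :=
    PySem.Int.floordiv_mul_add_mod _ _
  have hcomp : PySem.Int.floordiv (PySem.Int.floordiv (var - 1) N) N
      = PySem.Int.floordiv (var - 1) (N * N) := by
    rw [PySem.Int.floordiv_eq_ediv_of_pos hNpos, PySem.Int.floordiv_eq_ediv_of_pos hNpos,
      PySem.Int.floordiv_eq_ediv_of_pos hNN]
    exact Int.ediv_ediv_of_nonneg (by omega)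
  rw [hcomp] at hdiv2
  refine ⟨by rw [pvKeyI]; omega, by rw [pvKeyI]; omega, by rw [pvKeyJ]; omega,
    by rw [pvKeyJ]; omega, by rw [pvVal]; omega, by rw [pvVal]; omega, ?_⟩
  rw [get_var_id, pvKeyI, pvKeyJ, pvVal]
  nlinarith [hdiv1, hdiv2]

lemma pv_lookup_iff (asn : List (Int × Bool)) (k : Int) (hnd : (asn.map Prod.fst).Nodup) :
    pvLookup asn k = true ↔ (k, true) ∈ asn := by
  have hnd2 : (PySem.Dict.mk asn).keys.Nodup := by simpa using hnd
  constructor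
  · intro h
    rw [pvLookup, PySem.Dict.getD_eq_get?_getD] at h
    rcases hk : (PySem.Dict.mk asn).get? k with _ | b
    · rw [hk] at h; simp at h
    · rw [hk] at h
      simp at h
      subst h
      have := PySem.Dict.mem_items_of_get?_eq_some _ hk
      simpa using this
  · intro h
    rw [pvLookup]
    exact PySem.Dict.getD_of_mem_items _ (by simpa using h) hnd2 false

lemma pv_bridge (asn : List (Int × Bool)) (N i j x : Int) (hnd : (asn.map Prod.fst).Nodup)
    (hi1 : 1 ≤ i) (hi2 : i ≤ N) (hj1 : 1 ≤ j) (hj2 : j ≤ N) :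
    (∃ v ∈ PySem.List.pyRange 1 (N + 1) 1,
        pvLookup asn (get_var_id i j v N) = true ∧ x = v)
      ↔ ∃ e ∈ asn, (pvCond N e && ((pvKeyI N e.1, pvKeyJ N e.1) == (i, j))) = true ∧ x = pvVal N e.1 := by
  constructor
  · rintro ⟨v, hvR, hlk, hx⟩
    have hv := PySem.List.mem_pyRange_one.mp hvR
    obtain ⟨henc1, henc2, hkI, hkJ, hval⟩ :=
      pv_encode N i j v hi1 hi2 hj1 hj2 hv.1 (by omega)
    refine ⟨(get_var_id i j v N, true), (pv_lookup_iff asn _ hnd).mp hlk, ?_, ?_⟩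
    · show (pvCond N (get_var_id i j v N, true)
        && ((pvKeyI N (get_var_id i j v N), pvKeyJ N (get_var_id i j v N)) == (i, j))) = true
      rw [pvCond, hkI, hkJ]
      simp [henc1, henc2]
    · show x = pvVal N (get_var_id i j v N, true).1
      rw [hx]
      exact hval.symm
  · rintro ⟨⟨k, b⟩, he, hq, hx⟩
    rw [Bool.and_eq_true] at hq
    obtain ⟨hc, hk⟩ := hq
    rw [pvCond] at hc
    simp only [Bool.and_eq_true, decide_eq_true_eq] at hc
    have hb : b = true := hc.1.1
    have hk1 : 1 ≤ k := hc.1.2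
    have hk2 : k ≤ N * N * N := hc.2
    have hkey : ((pvKeyI N k, pvKeyJ N k) : Int × Int) = (i, j) := eq_of_beq hk
    have hN : (1:Int) ≤ N := le_trans hi1 hi2
    obtain ⟨kI1, kI2, kJ1, kJ2, v1, v2, hrec⟩ := pv_decode N k hk1 hk2 hN
    have hki : pvKeyI N k = i := congrArg Prod.fst hkey
    have hkj : pvKeyJ N k = j := congrArg Prod.snd hkey
    refine ⟨pvVal N k, PySem.List.mem_pyRange_one.mpr ⟨v1, by omega⟩, ?_, hx⟩
    rw [← hki, ← hkj, hrec]
    exact (pv_lookup_iff asn k hnd).mpr (hb ▸ he)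

lemma pv_cell_eq (asn : List (Int × Bool)) (N i j : Int) (hnd : (asn.map Prod.fst).Nodup)
    (hi1 : 1 ≤ i) (hi2 : i ≤ N) (hj1 : 1 ≤ j) (hj2 : j ≤ N) :
    pvCellFrom asn N i j 0 = (asn.foldl (pvStep N) PySem.Dict.empty).getD (i, j) 0 := by
  rw [pv_getD_best_fold N (i, j) asn PySem.Dict.empty, PySem.Dict.getD_empty]
  rw [pvCellFrom]
  rw [pv_foldl_last_eq_max (PySem.List.pyRange 1 (N + 1) 1)
    (fun v => pvLookup asn (get_var_id i j v N))
    ((PySem.List.pairwise_lt_pyRange_one _ _).imp (fun h => le_of_lt h)) 0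
    (fun v hv => by have := PySem.List.mem_pyRange_one.mp hv; omega)]
  obtain ⟨a1, b1, c1⟩ := pv_foldl_max_char (PySem.List.pyRange 1 (N + 1) 1)
    (fun v => pvLookup asn (get_var_id i j v N)) (fun v => v) 0
  obtain ⟨a2, b2, c2⟩ := pv_foldl_max_char asn
    (fun e => pvCond N e && ((pvKeyI N e.1, pvKeyJ N e.1) == (i, j))) (fun e => pvVal N e.1) 0
  apply le_antisymm
  · rcases b1 with h | ⟨v, hv, hqv, heq⟩
    · rw [h]; exact a2
    · obtain ⟨e, he, hqe, hxe⟩ :=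
        (pv_bridge asn N i j _ hnd hi1 hi2 hj1 hj2).mp ⟨v, hv, hqv, heq⟩
      rw [hxe]
      exact c2 e he hqe
  · rcases b2 with h | ⟨e, he, hqe, heq⟩
    · rw [h]; exact a1
    · obtain ⟨v, hv, hqv, hxv⟩ :=
        (pv_bridge asn N i j _ hnd hi1 hi2 hj1 hj2).mpr ⟨e, he, hqe, heq⟩
      rw [hxv]
      exact c1 v hv hqv

lemma pv_row_entry (asn : List (Int × Bool)) (N i : Int) (n : Nat) (b : Nat) (hb : b < n)
    (hmem : ((b : Int) + 1) ∈ PySem.List.pyRange 1 (N + 1) 1) :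
    (pvRow asn N i (List.replicate n 0)).getD b 0 = pvCellFrom asn N i ((b : Int) + 1) 0 := by
  have hpos : ∀ j ∈ PySem.List.pyRange 1 (N + 1) 1, (1:Int) ≤ j := by
    intro j hj; exact (PySem.List.mem_pyRange_one.mp hj).1
  have hpw : (PySem.List.pyRange 1 (N + 1) 1).Pairwise (· ≠ ·) :=
    (PySem.List.pairwise_lt_pyRange_one _ _).imp (fun h => ne_of_lt h)
  rw [pvRow]
  rw [pv_read_init (pvCellFrom asn N i) 0 _ _ (List.replicate n 0) hpw hpos (fun _ _ => rfl)]
  rw [pv_getD_fold_set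
    (fun j => pvCellFrom asn N i j ((List.replicate n (0:Int)).getD (j - 1).toNat 0)) 0
    _ _ b (by simpa using hb) hpos]
  rw [if_pos hmem]
  have h1 : (((b : Int) + 1 - 1)).toNat = b := by omega
  rw [h1]
  congr 1
  simp [List.getD, hb]

lemma pv_grid_entry (asn : List (Int × Bool)) (N : Int) (n : Nat) (m : Nat) (hm : m < n)
    (hmem : ((m : Int) + 1) ∈ PySem.List.pyRange 1 (N + 1) 1) :
    ((PySem.List.pyRange 1 (N + 1) 1).foldl
        (fun g i => g.set (i - 1).toNat
          (pvRow asn N i ((List.replicate n (List.replicate n (0:Int))).getD (i - 1).toNat [])))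
        (List.replicate n (List.replicate n 0))).getD m []
      = pvRow asn N ((m : Int) + 1) (List.replicate n 0) := by
  have hpos : ∀ j ∈ PySem.List.pyRange 1 (N + 1) 1, (1:Int) ≤ j := by
    intro j hj; exact (PySem.List.mem_pyRange_one.mp hj).1
  rw [pv_getD_fold_set
    (fun i => pvRow asn N i ((List.replicate n (List.replicate n (0:Int))).getD (i - 1).toNat []))
    [] _ _ m (by simpa using hm) hpos]
  rw [if_pos hmem]
  have h1 : (((m : Int) + 1 - 1)).toNat = m := by omega
  rw [h1]
  congr 1
  simp [List.getD, hm]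

-- ===== VERDICT (by name: the statement is the Claim_ definition above) =====
theorem reconstruct_grid_from_dpll_spec : Claim_equal_reconstruct_grid_from_dpll := by
  intro asn N _hdom hpre
  show reconstruct_grid_from_dpll asn N = reconstruct_grid_from_dpll_alt asn N
  by_cases hN : N ≤ 0
  · have hr : PySem.List.pyRange 1 (N + 1) 1 = [] := PySem.List.pyRange_one_eq_nil (by omega)
    simp [reconstruct_grid_from_dpll, reconstruct_grid_from_dpll_alt, hr,
      Int.toNat_of_nonpos hN]
  · have hN' : 0 < N := by omega
    have hpos : ∀ j ∈ PySem.List.pyRange 1 (N + 1) 1, (1:Int) ≤ j := by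
      intro j hj; exact (PySem.List.mem_pyRange_one.mp hj).1
    have hpw : (PySem.List.pyRange 1 (N + 1) 1).Pairwise (· ≠ ·) :=
      (PySem.List.pairwise_lt_pyRange_one _ _).imp (fun h => ne_of_lt h)
    have hmem : ∀ j : Int, j ∈ PySem.List.pyRange 1 (N + 1) 1 → 1 ≤ j ∧ (j - 1).toNat < N.toNat := by
      intro j hj
      have := PySem.List.mem_pyRange_one.mp hj
      omega
    have hA : reconstruct_grid_from_dpll asn N
        = (PySem.List.pyRange 1 (N + 1) 1).foldl
            (fun g i => g.set (i - 1).toNat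
              (pvRow asn N i
                ((List.replicate N.toNat (List.replicate N.toNat (0:Int))).getD (i - 1).toNat [])))
            (List.replicate N.toNat (List.replicate N.toNat 0)) := by
      rw [show reconstruct_grid_from_dpll asn N
          = (PySem.List.pyRange 1 (N + 1) 1).foldl (fun grid i =>
              (PySem.List.pyRange 1 (N + 1) 1).foldl (fun grid j =>
                (PySem.List.pyRange 1 (N + 1) 1).foldl (fun grid v =>
                  if (PySem.Dict.mk asn).getD (get_var_id i j v N) false then
                    PySem.List.pySetD grid (i - 1)
                      (PySem.List.pySetD (PySem.List.pyGetD grid (i - 1) []) (j - 1) v)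
                  else grid) grid) grid)
              (List.replicate N.toNat (List.replicate N.toNat 0)) from rfl]
      rw [pv_stageI asn N N.toNat hmem (PySem.List.pyRange 1 (N + 1) 1) hmem
        (List.replicate N.toNat (List.replicate N.toNat 0)) (by simp)
        (by intro r hr; rw [List.eq_of_mem_replicate hr]; simp)]
      exact pv_read_init (fun i r => pvRow asn N i r) [] _ _ _ hpw hpos (fun _ _ => rfl)
    rw [hA, pv_altB]
    have hlenA : ((PySem.List.pyRange 1 (N + 1) 1).foldl
        (fun g i => g.set (i - 1).toNat
          (pvRow asn N i
            ((List.replicate N.toNat (List.replicate N.toNat (0:Int))).getD (i - 1).toNat [])))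
        (List.replicate N.toNat (List.replicate N.toNat 0))).length = N.toNat := by
      rw [pv_len_fold_set (PySem.List.pyRange 1 (N + 1) 1) (fun i => (i - 1).toNat)
        (fun i g => pvRow asn N i
          ((List.replicate N.toNat (List.replicate N.toNat (0:Int))).getD (i - 1).toNat []))]
      simp
    apply List.ext_getElem
    · rw [hlenA]
      simp [PySem.List.length_pyRange_one]
    · intro m hm1 hm2
      have hmN : m < N.toNat := by rw [← hlenA]; exact hm1
      have hmemm : ((m : Int) + 1) ∈ PySem.List.pyRange 1 (N + 1) 1 := by
        rw [PySem.List.mem_pyRange_one]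
        omega
      have hLrow : ((PySem.List.pyRange 1 (N + 1) 1).foldl
          (fun g i => g.set (i - 1).toNat
            (pvRow asn N i
              ((List.replicate N.toNat (List.replicate N.toNat (0:Int))).getD (i - 1).toNat [])))
          (List.replicate N.toNat (List.replicate N.toNat 0)))[m]
          = pvRow asn N ((m : Int) + 1) (List.replicate N.toNat 0) := by
        rw [← pv_getD_eq _ [] m hm1]
        exact pv_grid_entry asn N N.toNat m hmN hmemm
      rw [hLrow]
      have hRrow : ((PySem.List.pyRange 1 (N + 1) 1).map (fun i =>
            (PySem.List.pyRange 1 (N + 1) 1).map (fun j =>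
              (asn.foldl (pvStep N) PySem.Dict.empty).getD (i, j) 0)))[m]
          = (PySem.List.pyRange 1 (N + 1) 1).map (fun j =>
              (asn.foldl (pvStep N) PySem.Dict.empty).getD (((m : Int) + 1), j) 0) := by
        rw [List.getElem_map, PySem.List.getElem_pyRange_one,
          show (1 + (m:Int)) = (m:Int) + 1 from by omega]
      rw [hRrow]
      apply List.ext_getElem
      · rw [pvRow_length]
        simp [PySem.List.length_pyRange_one]
      · intro b hb1 hb2
        have hbN : b < N.toNat := by
          rw [pvRow_length, List.length_replicate] at hb1
          exact hb1
        have hmemb : ((b : Int) + 1) ∈ PySem.List.pyRange 1 (N + 1) 1 := by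
          rw [PySem.List.mem_pyRange_one]
          omega
        have hL : (pvRow asn N ((m : Int) + 1) (List.replicate N.toNat 0))[b]
            = pvCellFrom asn N ((m : Int) + 1) ((b : Int) + 1) 0 := by
          rw [← pv_getD_eq _ 0 b hb1]
          exact pv_row_entry asn N ((m : Int) + 1) N.toNat b hbN hmemb
        rw [hL, List.getElem_map]
        have hblen : b < (PySem.List.pyRange 1 (N + 1) 1).length := by
          rw [PySem.List.length_pyRange_one]
          omega
        have hj : (PySem.List.pyRange 1 (N + 1) 1)[b]'hblen = (b : Int) + 1 := by
          rw [PySem.List.getElem_pyRange_one]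
          omega
        rw [hj]
        exact pv_cell_eq asn N ((m : Int) + 1) ((b : Int) + 1) hpre
          (by omega) (by {have := PySem.List.mem_pyRange_one.mp hmemm; omega})
          (by omega) (by {have := PySem.List.mem_pyRange_one.mp hmemb; omega})
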